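-- pv_equiv track=rewrite | github.com/CursedKeyboard/UofT-Class-selection | source/utils.py | replace_in_parenthesis
-- ===== SOURCE A (Python) =====
-- def replace_in_parenthesis(input_str: str, replace: str, replacement: str) -> str:
--     """ Return a modified version of <input_str> such that all <replace> within parenthesis are replaced
--     with <replacement>
--
--     Precondition: Parenthesis are not nested more than once
--
--     Args:
--         input_str: The string to be modified on
--         replace: The character to replace within parenthesis
--         replacement: The character to replace with
--
--     Returns:
--         Modified version of <input_str> such that it follows guidelines set above
--
--     Raises:
--         ValueError: Length of <replace> > 1 (it's more than a character)
--         ValueError: <Replace> is either '(' or ')'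
--
--     Examples:
--         >>> replace_commas_in_parenthesis('((,))',",",'a')
--         ValueError
--         >>> replace_commas_in_parenthesis('(,)', ",", 'a')
--         '(a)'
--     """
--     if len(replace) != 1 or replace == '(' or replace == ')':
--         raise ValueError
--     open_parenthesis = False
--     final_str = str()
--
--     for char in input_str:
--         if char == '(' and open_parenthesis:
--             raise ValueError
--         elif open_parenthesis and char == replace:
--             final_str += replacement
--         else:
--             if char == '(':
--                 open_parenthesis = True
--             elif char == ')':
--                 open_parenthesis = False
--             final_str += char
--
--     return final_str
-- ===== SOURCE B (Python) =====
-- def replace_in_parenthesis(input_str: str, replace: str, replacement: str) -> str: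
--     if len(replace) != 1 or replace == '(' or replace == ')':
--         raise ValueError
--     head, *rest = input_str.split('(')
--     parts = [head]
--     open_paren = False
--     for seg in rest:
--         if open_paren:
--             raise ValueError
--         inside, close, after = seg.partition(')')
--         parts.append('(' + ''.join(replacement if c == replace else c for c in inside) + close + after)
--         open_paren = (close == '')
--     return ''.join(parts)
-- ===== Notes on version B (the rewrite author's own statement) =====
-- stated objective: alternative
-- what changed: A walks the string character by character with an open_parenthesis flag; B splits the string on '(', partitions each subsequent segment at its first ')' and substitutes the character only in the part before it, joining the segments back together.
import Mathlib
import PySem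

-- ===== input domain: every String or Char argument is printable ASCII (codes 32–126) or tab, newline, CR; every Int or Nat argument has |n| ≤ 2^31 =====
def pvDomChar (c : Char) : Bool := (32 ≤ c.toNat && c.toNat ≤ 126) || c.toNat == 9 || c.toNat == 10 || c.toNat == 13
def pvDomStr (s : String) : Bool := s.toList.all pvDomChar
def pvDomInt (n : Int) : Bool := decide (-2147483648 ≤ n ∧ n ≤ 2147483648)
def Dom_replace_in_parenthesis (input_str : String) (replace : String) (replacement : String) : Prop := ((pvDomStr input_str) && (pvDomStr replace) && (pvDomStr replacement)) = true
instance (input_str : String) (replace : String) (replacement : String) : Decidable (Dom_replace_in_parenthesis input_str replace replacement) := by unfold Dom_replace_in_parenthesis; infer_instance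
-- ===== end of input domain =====

-- B replaces A's single stateful character-by-character loop by split-on-'(' / partition-on-')' segment
-- processing (objective: alternative decomposition, same asymptotic cost).
-- A raises ValueError when replace is not a single non-parenthesis character or when a '(' occurs while a
-- previous '(' is still open (nested parentheses); Pre_ excludes exactly those inputs.

-- ===== PORT A =====
-- A's loop, transliterated: state is the open_parenthesis flag; the output is emitted in order.
-- On the 'raise ValueError' path (a '(' while open) Python returns nothing; the port stops (outside Pre_).
def pvGoA (rc : Char) (rep : List Char) : List Char → Bool → List Char
  | [], _ => []
  | c :: rest, opn =>
    if c = '(' ∧ opn then []  -- Python: raise ValueError (excluded by Pre_)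
    else if opn ∧ c = rc then rep ++ pvGoA rc rep rest opn
    else
      c :: pvGoA rc rep rest (if c = '(' then true else if c = ')' then false else opn)

def replace_in_parenthesis (input_str : String) (replace : String) (replacement : String) : String :=
  match replace.toList with
  | [rc] =>
    if rc = '(' ∨ rc = ')' then ""  -- Python: raise ValueError (excluded by Pre_)
    else String.ofList (pvGoA rc replacement.toList input_str.toList false)
  | _ => ""  -- len(replace) ≠ 1: Python raises ValueError (excluded by Pre_)

-- ===== PORT B =====
-- B's loop over the segments produced by input_str.split('(').  Python's str.split('(') is ported as
-- Mathlib's List.splitOn '(' (exact for a one-character separator); seg.partition(')') is ported as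
-- takeWhile/dropWhile on pvNC (exact for a one-character separator); ''.join is List.flatten.
def pvNC (c : Char) : Bool := c ≠ ')'

def pvSubst (rc : Char) (rep : List Char) (c : Char) : List Char := if c = rc then rep else [c]

def pvGoB (rc : Char) (rep : List Char) : List (List Char) → Bool → List (List Char)
  | [], _ => []
  | seg :: rest, opn =>
    if opn then []  -- Python: raise ValueError (excluded by Pre_)
    else
      ('(' :: ((seg.takeWhile pvNC).flatMap (pvSubst rc rep) ++ seg.dropWhile pvNC))
        :: pvGoB rc rep rest (seg.dropWhile pvNC).isEmpty

def replace_in_parenthesis_alt (input_str : String) (replace : String) (replacement : String) : String :=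
  match replace.toList with
  | rc :: rs =>
    if rs ≠ [] ∨ rc = '(' ∨ rc = ')' then ""  -- Python: raise ValueError (excluded by Pre_)
    else
      match List.splitOn '(' input_str.toList with
      | [] => ""  -- unreachable: splitOn never returns []
      | head :: rest => String.ofList ((head :: pvGoB rc replacement.toList rest false).flatten)
  | [] => ""  -- len(replace) = 0: Python raises ValueError (excluded by Pre_)

-- ===== PRECONDITION & SPEC =====
-- Pre_ admits exactly the inputs on which A returns: replace is one character, not '(' or ')', and
-- input_str has no nested '(' (no two '(' without a ')' strictly between them).
def Pre_replace_in_parenthesis (input_str : String) (replace : String) (replacement : String) : Prop :=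
  replace.toList.length = 1 ∧ replace.toList ≠ ['('] ∧ replace.toList ≠ [')'] ∧
  ∀ i ∈ List.range input_str.toList.length, ∀ j ∈ List.range input_str.toList.length,
    i < j → input_str.toList[i]? = some '(' → input_str.toList[j]? = some '(' →
      ∃ k ∈ List.range input_str.toList.length, i < k ∧ k < j ∧ input_str.toList[k]? = some ')'
instance (input_str : String) (replace : String) (replacement : String) : Decidable (Pre_replace_in_parenthesis input_str replace replacement) := by unfold Pre_replace_in_parenthesis; infer_instance

def pvWitness_replace_in_parenthesis : String × String × String := ("x(a,b)(c)", ",", "a")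

def Spec_replace_in_parenthesis (input_str : String) (replace : String) (replacement : String) (out : String) : Prop := out = replace_in_parenthesis_alt input_str replace replacement
instance (input_str : String) (replace : String) (replacement : String) (out : String) : Decidable (Spec_replace_in_parenthesis input_str replace replacement out) := by unfold Spec_replace_in_parenthesis; infer_instance

-- ===== CLAIM (what is proved, stated in full; the proofs are below) =====
def Claim_equal_replace_in_parenthesis : Prop := ∀ (input_str : String) (replace : String) (replacement : String), Dom_replace_in_parenthesis input_str replace replacement → Pre_replace_in_parenthesis input_str replace replacement → Spec_replace_in_parenthesis input_str replace replacement (replace_in_parenthesis input_str replace replacement)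

-- ===== LEMMAS AND PROOFS =====

theorem pvNC_close : pvNC ')' = false := by simp [pvNC]

theorem pvNC_of_ne {c : Char} (h : c ≠ ')') : pvNC c = true := by simp [pvNC, h]

theorem pvNC_mem_takeWhile {c : Char} {l : List Char} (h : c ∈ l.takeWhile pvNC) : c ≠ ')' := by
  have := List.mem_takeWhile_imp h
  simpa [pvNC] using this

-- single-step shapes of A's loop
theorem pvGoA_step_open_paren (rc : Char) (rep rest : List Char) :
    pvGoA rc rep ('(' :: rest) false = '(' :: pvGoA rc rep rest true := by
  simp [pvGoA]

theorem pvGoA_step_closed {c : Char} (rc : Char) (rep rest : List Char) (hc : c ≠ '(') :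
    pvGoA rc rep (c :: rest) false = c :: pvGoA rc rep rest false := by
  by_cases h : c = ')' <;> simp [pvGoA, hc, h]

theorem pvGoA_step_close (rc : Char) (rep rest : List Char) (hrc : rc ≠ ')') (opn : Bool) :
    pvGoA rc rep (')' :: rest) opn = ')' :: pvGoA rc rep rest false := by
  have h : ¬((')' : Char) = rc) := Ne.symm hrc
  cases opn <;> simp [pvGoA, h]

theorem pvGoA_step_rep {c : Char} (rc : Char) (rep rest : List Char) (hc : c ≠ '(')
    (hcr : c = rc) : pvGoA rc rep (c :: rest) true = rep ++ pvGoA rc rep rest true := by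
  subst hcr
  simp [pvGoA, hc]

theorem pvGoA_step_open_plain {c : Char} (rc : Char) (rep rest : List Char) (hc1 : c ≠ '(')
    (hc2 : c ≠ ')') (hcr : c ≠ rc) :
    pvGoA rc rep (c :: rest) true = c :: pvGoA rc rep rest true := by
  simp [pvGoA, hc1, hc2, hcr]

-- A's loop with the flag closed and no '(' copies its input verbatim
theorem pvGoA_closed (rc : Char) (rep : List Char) : ∀ l : List Char, '(' ∉ l →
    pvGoA rc rep l false = l := by
  intro l
  induction l with
  | nil => intro _; rfl
  | cons c rest ih =>
    intro h
    have hc : c ≠ '(' := fun hc => h (by simp [hc])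
    rw [pvGoA_step_closed rc rep rest hc, ih (fun hm => h (by simp [hm]))]

-- A's loop up to (and including) the first '('
theorem pvGoA_closed_prefix (rc : Char) (rep : List Char) (m : List Char) :
    ∀ a : List Char, '(' ∉ a →
      pvGoA rc rep (a ++ '(' :: m) false = a ++ '(' :: pvGoA rc rep m true := by
  intro a
  induction a with
  | nil => intro _; simpa using pvGoA_step_open_paren rc rep m
  | cons c rest ih =>
    intro h
    have hc : c ≠ '(' := fun hc => h (by simp [hc])
    rw [List.cons_append, pvGoA_step_closed rc rep _ hc, ih (fun hm => h (by simp [hm]))]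
    rfl

-- A's loop with the flag open, until the closing ')' (if any)
-- the part of A's output contributed after the closing ')' of an open segment
def pvTail (rc : Char) (rep : List Char) : List Char → List Char
  | [] => []
  | _ :: t => ')' :: pvGoA rc rep t false

theorem pvGoA_open (rc : Char) (rep : List Char) (hrc2 : rc ≠ ')') :
    ∀ l : List Char, '(' ∉ l.takeWhile pvNC →
      pvGoA rc rep l true =
        (l.takeWhile pvNC).flatMap (pvSubst rc rep) ++ pvTail rc rep (l.dropWhile pvNC) := by
  intro l
  induction l with
  | nil => intro _; rfl
  | cons c rest ih =>
    intro h
    by_cases hc : c = ')'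
    · subst hc
      rw [List.takeWhile_cons_of_neg (by simp [pvNC_close]),
          List.dropWhile_cons_of_neg (by simp [pvNC_close]),
          pvGoA_step_close rc rep rest hrc2]
      simp [pvTail]
    · have hp : pvNC c = true := pvNC_of_ne hc
      rw [List.takeWhile_cons_of_pos hp, List.dropWhile_cons_of_pos hp] at *
      have hcp : c ≠ '(' := fun hcp => h (by simp [hcp])
      have hrest : '(' ∉ rest.takeWhile pvNC := fun hm => h (by simp [hm])
      by_cases hcr : c = rc
      · rw [pvGoA_step_rep rc rep rest hcp hcr, ih hrest]
        simp [pvSubst, hcr]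
      · rw [pvGoA_step_open_plain rc rep rest hcp hc hcr, ih hrest]
        simp [pvSubst, hcr]

theorem pvDropWhile_head_close : ∀ {l : List Char} {x : Char} {t : List Char},
    l.dropWhile pvNC = x :: t → x = ')' := by
  intro l
  induction l with
  | nil => intro x t h; simp at h
  | cons c rest ih =>
    intro x t h
    by_cases hp : pvNC c = true
    · rw [List.dropWhile_cons_of_pos hp] at h
      exact ih h
    · rw [List.dropWhile_cons_of_neg hp] at h
      cases h
      simpa [pvNC] using hp

-- str.split('(') : one-step characterizations
theorem pvSplitOn_cons_eq (l : List Char) :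
    List.splitOn '(' ('(' :: l) = [] :: List.splitOn '(' l := by
  simp [List.splitOn, List.splitOnP_cons]

theorem pvSplitOn_cons_ne {c : Char} (l : List Char) (hc : c ≠ '(') :
    List.splitOn '(' (c :: l) = (List.splitOn '(' l).modifyHead (List.cons c) := by
  simp [List.splitOn, List.splitOnP_cons, hc]

theorem pvSplitOn_no : ∀ l : List Char, '(' ∉ l → List.splitOn '(' l = [l] := by
  intro l
  induction l with
  | nil => intro _; rfl
  | cons c rest ih =>
    intro h
    have hc : c ≠ '(' := fun hc => h (by simp [hc])
    rw [pvSplitOn_cons_ne rest hc, ih (fun hm => h (by simp [hm]))]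
    rfl

theorem pvSplitOn_first (m : List Char) : ∀ a : List Char, '(' ∉ a →
    List.splitOn '(' (a ++ '(' :: m) = a :: List.splitOn '(' m := by
  intro a
  induction a with
  | nil => simpa using pvSplitOn_cons_eq m
  | cons c rest ih =>
    intro h
    have hc : c ≠ '(' := fun hc => h (by simp [hc])
    rw [List.cons_append, pvSplitOn_cons_ne _ hc, ih (fun hm => h (by simp [hm]))]
    rfl

theorem pvSplitOn_ne_nil (l : List Char) : List.splitOn '(' l ≠ [] := by
  simpa [List.splitOn] using List.splitOnP_ne_nil (fun x => x == '(') l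

theorem pvTakeWhile_app {x : List Char} (y : List Char) (h : ')' ∉ x) :
    (x ++ ')' :: y).takeWhile pvNC = x := by
  induction x with
  | nil => simp [List.takeWhile_cons_of_neg, pvNC_close]
  | cons c rest ih =>
    have hc : c ≠ ')' := fun hc => h (by simp [hc])
    rw [List.cons_append, List.takeWhile_cons_of_pos (pvNC_of_ne hc),
        ih (fun hm => h (by simp [hm]))]

theorem pvDropWhile_app {x : List Char} (y : List Char) (h : ')' ∉ x) :
    (x ++ ')' :: y).dropWhile pvNC = ')' :: y := by
  induction x with
  | nil => simp [List.dropWhile_cons_of_neg, pvNC_close]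
  | cons c rest ih =>
    have hc : c ≠ ')' := fun hc => h (by simp [hc])
    rw [List.cons_append, List.dropWhile_cons_of_pos (pvNC_of_ne hc),
        ih (fun hm => h (by simp [hm]))]

-- "no nested parentheses", decomposition form used by the proofs
def pvDNN (l : List Char) : Prop :=
  ∀ a m : List Char, l = a ++ '(' :: m → '(' ∉ m.takeWhile pvNC

theorem pvDNN_suffix {x y : List Char} (h : pvDNN (x ++ y)) : pvDNN y := by
  intro a m hy
  exact h (x ++ a) m (by simp [hy])

-- the index form of Pre_ implies the decomposition form
theorem pvPNN_to_DNN (l : List Char)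
    (h : ∀ i ∈ List.range l.length, ∀ j ∈ List.range l.length,
      i < j → l[i]? = some '(' → l[j]? = some '(' →
        ∃ k ∈ List.range l.length, i < k ∧ k < j ∧ l[k]? = some ')') :
    pvDNN l := by
  intro a m hl hmem
  obtain ⟨p, hp⟩ := List.mem_iff_getElem?.mp hmem
  have hplen : p < (m.takeWhile pvNC).length := (List.getElem?_eq_some_iff.mp hp).1
  obtain ⟨tl, htl⟩ := List.takeWhile_prefix (l := m) pvNC
  -- m[q]? agrees with the takeWhile prefix for q below its length
  have hagree : ∀ q, q < (m.takeWhile pvNC).length → m[q]? = (m.takeWhile pvNC)[q]? := by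
    intro q hq
    have := List.getElem?_append_left (l₁ := m.takeWhile pvNC) (l₂ := tl) hq
    rw [htl] at this
    exact this
  have hmp : m[p]? = some '(' := by rw [hagree p hplen, hp]
  have hi : l[a.length]? = some '(' := by
    subst hl
    rw [List.getElem?_append_right (le_refl _)]
    simp
  have hj : l[a.length + 1 + p]? = some '(' := by
    subst hl
    rw [List.getElem?_append_right (by omega)]
    have he : a.length + 1 + p - a.length = p + 1 := by omega
    rw [he]
    simpa using hmp
  have hilen : a.length < l.length := by
    have := (List.getElem?_eq_some_iff.mp hi).1
    exact this
  have hjlen : a.length + 1 + p < l.length := (List.getElem?_eq_some_iff.mp hj).1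
  obtain ⟨k, -, hik, hkj, hk⟩ :=
    h a.length (List.mem_range.mpr hilen) (a.length + 1 + p) (List.mem_range.mpr hjlen)
      (by omega) hi hj
  -- k names a ')' strictly between — but that position lies in the takeWhile region of m
  have hq : l[k]? = m[k - a.length - 1]? := by
    subst hl
    rw [List.getElem?_append_right (by omega)]
    have he : k - a.length = (k - a.length - 1) + 1 := by omega
    rw [he]
    simp
  have hqlt : k - a.length - 1 < (m.takeWhile pvNC).length := by omega
  have hsome : (m.takeWhile pvNC)[k - a.length - 1]? = some ')' := by
    rw [← hagree _ hqlt, ← hq, hk]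
  have hmemtw : ')' ∈ m.takeWhile pvNC := List.mem_iff_getElem?.mpr ⟨_, hsome⟩
  exact pvNC_mem_takeWhile hmemtw rfl

-- first occurrence decomposition
theorem pvExFirst {c : Char} : ∀ {l : List Char}, c ∈ l → ∃ a m, l = a ++ c :: m ∧ c ∉ a := by
  intro l
  induction l with
  | nil => intro h; cases h
  | cons x xs ih =>
    intro h
    by_cases hx : x = c
    · exact ⟨[], xs, by simp [hx], by simp⟩
    · have hxs : c ∈ xs := by
        rcases List.mem_cons.mp h with h1 | h1
        · exact absurd h1.symm hx
        · exact h1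
      obtain ⟨a, m, hm, hna⟩ := ih hxs
      refine ⟨x :: a, m, by simp [hm], ?_⟩
      intro hc
      rcases List.mem_cons.mp hc with h1 | h1
      · exact hx h1.symm
      · exact hna h1

-- B's assembled output (proof-side abbreviation of B's body)
def pvBody (rc : Char) (rep : List Char) (l : List Char) : List Char :=
  match List.splitOn '(' l with
  | [] => []
  | head :: rest => (head :: pvGoB rc rep rest false).flatten

-- main bridge: A's loop from the closed state equals B's segment assembly
theorem pvMain (rc : Char) (rep : List Char) (hrc2 : rc ≠ ')') :
    ∀ n (l : List Char), l.length ≤ n → pvDNN l →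
      pvGoA rc rep l false = pvBody rc rep l := by
  intro n
  induction n with
  | zero =>
    intro l hl _
    have : l = [] := List.length_eq_zero_iff.mp (Nat.le_zero.mp hl)
    subst this; rfl
  | succ n ih =>
    intro l hl hdnn
    by_cases hmem : '(' ∈ l
    · obtain ⟨a, m, hlam, hna⟩ := pvExFirst hmem
      subst hlam
      have hins : '(' ∉ m.takeWhile pvNC := hdnn a m rfl
      have hinc : ')' ∉ m.takeWhile pvNC := fun hx => pvNC_mem_takeWhile hx rfl
      rw [pvGoA_closed_prefix rc rep m a hna, pvGoA_open rc rep hrc2 m hins]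
      unfold pvBody
      rw [pvSplitOn_first m a hna]
      cases hdw : m.dropWhile pvNC with
      | nil =>
        -- no ')' after the '(' : the final segment stays open
        have hnoclose : ')' ∉ m := by
          intro hmem2
          have he : m.takeWhile pvNC = m := by
            have := List.takeWhile_append_dropWhile (p := pvNC) (l := m)
            rw [hdw, List.append_nil] at this
            exact this
          apply hinc
          rw [he]
          exact hmem2
        have htw : m.takeWhile pvNC = m := by
          have := List.takeWhile_append_dropWhile (p := pvNC) (l := m)
          rw [hdw, List.append_nil] at this
          exact this
        have hnom : '(' ∉ m := htw ▸ hins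
        rw [pvSplitOn_no m hnom]
        simp [pvGoB, pvTail, htw, hdw]
      | cons x t =>
        have hx : x = ')' := pvDropWhile_head_close hdw
        subst hx
        have hm : m = m.takeWhile pvNC ++ ')' :: t := by
          conv_lhs => rw [← List.takeWhile_append_dropWhile (p := pvNC) (l := m)]
          rw [hdw]
        -- replace the takeWhile-part by an opaque variable i
        obtain ⟨i, hi⟩ : ∃ i, m.takeWhile pvNC = i := ⟨_, rfl⟩
        rw [hi] at hins hinc hm
        rw [hi]
        by_cases hmt : '(' ∈ t
        · obtain ⟨b, u, htbu, hnb⟩ := pvExFirst hmt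
          have hsplitm : List.splitOn '(' m = (i ++ ')' :: b) :: List.splitOn '(' u := by
            rw [hm, htbu]
            have he : i ++ ')' :: (b ++ '(' :: u) = (i ++ ')' :: b) ++ '(' :: u := by simp
            rw [he]
            refine pvSplitOn_first u _ ?_
            intro hxm
            rcases List.mem_append.mp hxm with hxm | hxm
            · exact hins hxm
            · rcases List.mem_cons.mp hxm with hxm | hxm
              · simp at hxm
              · exact hnb hxm
          rw [hsplitm]
          have hdnn_t : pvDNN t := by
            have he : a ++ '(' :: m = (a ++ '(' :: i ++ [')']) ++ t := by
              rw [hm]; simp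
            exact pvDNN_suffix (x := a ++ '(' :: i ++ [')']) (he ▸ hdnn)
          have hlen_t : t.length ≤ n := by
            have h1 : m.length = i.length + 1 + t.length := by rw [hm]; simp; omega
            have h2 : (a ++ '(' :: m).length = a.length + 1 + m.length := by simp; omega
            omega
          have hIH := ih t hlen_t hdnn_t
          unfold pvBody at hIH
          rw [htbu, pvSplitOn_first u b hnb] at hIH
          simp only [pvTail]
          rw [htbu, hIH]
          have hbnc : ')' ∉ i := fun hxx => hinc hxx
          simp [pvGoB, pvTakeWhile_app b hbnc, pvDropWhile_app b hbnc]
        · -- '(' not in t: m contains no '(' at all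
          have hnom : '(' ∉ m := by
            intro hx
            rw [hm] at hx
            rcases List.mem_append.mp hx with hx | hx
            · exact hins hx
            · rcases List.mem_cons.mp hx with hx | hx
              · simp at hx
              · exact hmt hx
          rw [pvSplitOn_no m hnom]
          have hbnc : ')' ∉ i := fun hxx => hinc hxx
          have hgoAt : pvGoA rc rep t false = t := pvGoA_closed rc rep t hmt
          conv_rhs => rw [hm]
          simp [pvGoB, pvTail, pvTakeWhile_app t hbnc, pvDropWhile_app t hbnc, hgoAt]
    · rw [pvGoA_closed rc rep l hmem]
      unfold pvBody
      rw [pvSplitOn_no l hmem]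
      simp [pvGoB]

-- ===== VERDICT (by name: the statement is the Claim_ definition above) =====
theorem replace_in_parenthesis_spec : Claim_equal_replace_in_parenthesis := by
  intro input_str replace replacement _ hpre
  obtain ⟨hlen, hno, hnc, hnn⟩ := hpre
  obtain ⟨rc, hrl⟩ := List.length_eq_one_iff.mp hlen
  have hrc1 : rc ≠ '(' := fun h => hno (by rw [hrl, h])
  have hrc2 : rc ≠ ')' := fun h => hnc (by rw [hrl, h])
  unfold Spec_replace_in_parenthesis replace_in_parenthesis replace_in_parenthesis_alt
  rw [hrl]
  simp only [if_neg (by simp [hrc1, hrc2] : ¬(rc = '(' ∨ rc = ')')),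
    if_neg (by simp [hrc1, hrc2] : ¬(([] : List Char) ≠ [] ∨ rc = '(' ∨ rc = ')'))]
  have hmain := pvMain rc replacement.toList hrc2 input_str.toList.length
    input_str.toList (le_refl _) (pvPNN_to_DNN input_str.toList hnn)
  rw [hmain]
  unfold pvBody
  cases hsp : List.splitOn '(' input_str.toList with
  | nil => exact absurd hsp (pvSplitOn_ne_nil _)
  | cons head rest => rfl
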